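-- pv_equiv track=rewrite | github.com/gdatskov/SoftUni | Python Advanced/file_handling/Homework_eval/line_numbers.py | count
-- ===== SOURCE A (Python) =====
-- import string
--
-- def count(line):
--         marks = 0
--         letters = 0
--         for s in line:
--             if s in string.punctuation:
--                 marks += 1
--             elif s in string.ascii_letters:
--                 letters += 1
--         return letters, marks
-- ===== SOURCE B (Python) =====
-- import string
--
-- def count(line):
--     freq = {}
--     for ch in line:
--         freq[ch] = freq.get(ch, 0) + 1
--     letters = sum(freq.get(c, 0) for c in string.ascii_letters)
--     marks = sum(freq.get(c, 0) for c in string.punctuation)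
--     return letters, marks
-- ===== Notes on version B (the rewrite author's own statement) =====
-- stated objective: alternative
-- what changed: B builds a character frequency table in one pass and then sums the counts over the fixed ascii_letters and punctuation alphabets, instead of A's per-character branch classification during the scan.
import Mathlib
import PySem

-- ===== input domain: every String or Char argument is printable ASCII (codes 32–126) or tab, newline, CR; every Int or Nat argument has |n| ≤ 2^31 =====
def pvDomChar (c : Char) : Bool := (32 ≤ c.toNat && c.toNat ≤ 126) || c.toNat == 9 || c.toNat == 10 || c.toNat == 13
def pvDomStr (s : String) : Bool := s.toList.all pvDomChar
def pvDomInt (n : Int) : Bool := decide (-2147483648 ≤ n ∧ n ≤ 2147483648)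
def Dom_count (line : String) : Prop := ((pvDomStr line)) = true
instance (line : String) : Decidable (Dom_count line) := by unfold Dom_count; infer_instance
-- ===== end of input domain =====

-- B builds a frequency table in one pass, then sums counts over the fixed letter/punctuation
-- alphabets (alternative decomposition; same results proved equal).


-- ===== PORT A =====
-- string.punctuation and string.ascii_letters as character lists
def punctChars : List Char := "!\"#$%&'()*+,-./:;<=>?@[\\]^_`{|}~".toList
def letterChars : List Char := "abcdefghijklmnopqrstuvwxyzABCDEFGHIJKLMNOPQRSTUVWXYZ".toList

-- A: one pass over the line, disjoint branch per character; state (marks, letters)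
def count (line : String) : Int × Int :=
  let r := line.toList.foldl
    (fun (p : Int × Int) s =>
      if s ∈ punctChars then (p.1 + 1, p.2)
      else if s ∈ letterChars then (p.1, p.2 + 1)
      else p)
    (0, 0)
  (r.2, r.1)

-- ===== PORT B =====
-- B: build freq table (dict of counts), then sum freq over each fixed alphabet
def count_alt (line : String) : Int × Int :=
  let freq := line.toList.foldl
    (fun (d : PySem.Dict Char Int) ch => d.insert ch (d.getD ch 0 + 1)) PySem.Dict.empty
  let letters := (letterChars.map (fun c => freq.getD c 0)).sum
  let marks := (punctChars.map (fun c => freq.getD c 0)).sum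
  (letters, marks)

-- ===== PRECONDITION & SPEC =====
def Spec_count (line : String) (out : Int × Int) : Prop := out = count_alt line
instance (line : String) (out : Int × Int) : Decidable (Spec_count line out) := by unfold Spec_count; infer_instance

-- ===== CLAIM (what is proved, stated in full; the proofs are below) =====
def Claim_equal_count : Prop := ∀ (line : String), Dom_count line → Spec_count line (count line)

-- ===== LEMMAS AND PROOFS =====

-- indicator sum over a duplicate-free list
theorem sum_indicator_nodup (S : List Char) (x : Char) (h : S.Nodup) :
    (S.map (fun c => if x == c then (1 : Int) else 0)).sum = if x ∈ S then 1 else 0 := by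
  induction S with
  | nil => simp
  | cons a t ih =>
    simp only [List.nodup_cons] at h
    rw [List.map_cons, List.sum_cons, ih h.2]
    by_cases hx : x = a
    · subst hx; simp [h.1]
    · simp [hx, List.mem_cons]

-- summing per-character counts over a duplicate-free alphabet counts membership
theorem sum_count_eq_countP (S : List Char) (h : S.Nodup) (cs : List Char) :
    (S.map (fun c => (cs.count c : Int))).sum = (cs.countP (· ∈ S) : Int) := by
  induction cs with
  | nil => simp
  | cons x t ih =>
    have hcnt : ∀ c : Char, ((x :: t).count c : Int) = (t.count c : Int) + (if x == c then 1 else 0) := by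
      intro c
      rcases eq_or_ne c x with rfl | hne
      · simp
      · simp [Ne.symm hne]
    calc (S.map (fun c => ((x :: t).count c : Int))).sum
        = (S.map (fun c => (t.count c : Int) + (if x == c then 1 else 0))).sum := by
          congr 1; exact List.map_congr_left (fun c _ => hcnt c)
      _ = (S.map (fun c => (t.count c : Int))).sum
            + (S.map (fun c => if x == c then (1 : Int) else 0)).sum := by
          rw [← List.sum_map_add]
      _ = (t.countP (· ∈ S) : Int) + (if x ∈ S then 1 else 0) := by
          rw [ih, sum_indicator_nodup S x h]
      _ = ((x :: t).countP (· ∈ S) : Int) := by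
          by_cases hx : x ∈ S <;> simp [hx]

set_option maxRecDepth 4096 in
theorem punct_nodup : punctChars.Nodup := by decide
set_option maxRecDepth 4096 in
theorem letter_nodup : letterChars.Nodup := by decide
theorem disjoint_alpha : ∀ c : Char, c ∈ letterChars → c ∉ punctChars := by
  have hb : letterChars.all (fun c => decide (c ∉ punctChars)) = true := by decide
  intro c hc
  exact of_decide_eq_true (List.all_eq_true.mp hb c hc)

-- A's fold characterised
theorem countA_fold (cs : List Char) (m l : Int) :
    cs.foldl (fun (p : Int × Int) s =>
        if s ∈ punctChars then (p.1 + 1, p.2)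
        else if s ∈ letterChars then (p.1, p.2 + 1)
        else p) (m, l)
      = (m + (cs.countP (· ∈ punctChars) : Int), l + (cs.countP (· ∈ letterChars) : Int)) := by
  induction cs generalizing m l with
  | nil => simp
  | cons x t ih =>
    by_cases hp : x ∈ punctChars
    · have hl : x ∉ letterChars := fun hx => disjoint_alpha x hx hp
      simp only [List.foldl_cons, if_pos hp, ih, List.countP_cons]
      simp [hp, hl]
      ring
    · by_cases hl : x ∈ letterChars
      · simp only [List.foldl_cons, if_neg hp, if_pos hl, ih, List.countP_cons]
        simp [hp, hl]
        ring
      · simp only [List.foldl_cons, if_neg hp, if_neg hl, ih, List.countP_cons]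
        simp [hp, hl]

-- ===== VERDICT (by name: the statement is the Claim_ definition above) =====
theorem count_spec : Claim_equal_count := by
  intro line _
  unfold Spec_count count count_alt
  rw [PySem.Dict.foldl_insert_getD_add_one_eq_counter]
  simp only [PySem.Dict.getD_counter]
  rw [sum_count_eq_countP letterChars letter_nodup, sum_count_eq_countP punctChars punct_nodup,
    countA_fold]
  simp
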